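-- pv_equiv track=rewrite | github.com/dover9/cow-synchronization-model | utils.py | get_transition_times
-- ===== SOURCE A (Python) =====
-- def get_transition_times(obs_states, target_state, min_duration=3):
--     """
--     Returns time indices where the cow *enters* `target_state` and remains there
--     for at least `min_duration` steps.
--     """
--     transition_times = []
--     t = 1
--     while t < len(obs_states):
--         if obs_states[t] == target_state and obs_states[t - 1] != target_state:
--             # Check if cow stays in target_state long enough
--             duration = 1
--             while t + duration < len(obs_states) and obs_states[t + duration] == target_state:
--                 duration += 1
--             if duration >= min_duration:
--                 transition_times.append(t)
--                 t += duration  # skip forward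
--             else:
--                 t += 1  # too short to count, just move on
--         else:
--             t += 1
--     return transition_times
-- ===== SOURCE B (Python) =====
-- from itertools import groupby
--
-- def get_transition_times(obs_states, target_state, min_duration=3):
--     """Run-decomposition version: split into maximal runs and filter."""
--     result = []
--     i = 0
--     for value, group in groupby(obs_states):
--         length = sum(1 for _ in group)
--         if value == target_state and i >= 1 and length >= min_duration:
--             result.append(i)
--         i += length
--     return result
-- ===== Notes on version B (the rewrite author's own statement) =====
-- stated objective: simpler
-- what changed: Replaced the fused nested-while scan-and-skip over indices by an itertools.groupby run decomposition with a running absolute index, appending each run start with value == target, start >= 1 and length >= min_duration.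
import Mathlib
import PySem

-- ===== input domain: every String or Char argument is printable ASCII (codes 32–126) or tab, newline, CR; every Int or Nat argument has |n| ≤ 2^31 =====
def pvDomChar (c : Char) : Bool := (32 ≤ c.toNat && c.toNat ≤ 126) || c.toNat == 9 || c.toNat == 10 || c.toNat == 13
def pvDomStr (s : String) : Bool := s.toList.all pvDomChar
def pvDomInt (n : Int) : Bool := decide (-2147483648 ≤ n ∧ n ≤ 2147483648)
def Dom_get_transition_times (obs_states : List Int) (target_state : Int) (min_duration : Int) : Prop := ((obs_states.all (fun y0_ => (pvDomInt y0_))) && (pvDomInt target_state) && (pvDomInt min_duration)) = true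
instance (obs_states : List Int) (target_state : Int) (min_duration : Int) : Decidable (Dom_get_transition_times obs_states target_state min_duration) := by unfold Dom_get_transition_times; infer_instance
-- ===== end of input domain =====

-- B replaces A's fused scan-and-skip while loop by a run decomposition (groupby)
-- followed by a filtering pass; objective: simpler. Return values are equal on all inputs.

-- ===== PORT A =====
-- inner while loop: 'while t + duration < len(obs_states) and obs_states[t+duration] == target_state: duration += 1'
def pvInnerA (obs : List Int) (target : Int) (t : Nat) (duration : Nat) : Nat :=
  if t + duration < obs.length ∧ obs.getD (t + duration) 0 = target then
    pvInnerA obs target t (duration + 1)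
  else duration
termination_by obs.length - (t + duration)
decreasing_by omega

theorem pvInnerA_ge (obs : List Int) (target : Int) (t d : Nat) : d ≤ pvInnerA obs target t d := by
  unfold pvInnerA
  split
  · exact le_trans (Nat.le_succ d) (pvInnerA_ge obs target t (d+1))
  · exact le_refl d
termination_by obs.length - (t + d)
decreasing_by omega

-- outer while loop over t (index access is guarded by t < len, as in Python)
def pvLoopA (obs : List Int) (target : Int) (md : Int) (t : Nat) (acc : List Int) : List Int :=
  if h : t < obs.length then
    if obs.getD t 0 = target ∧ obs.getD (t - 1) 0 ≠ target then
      let d := pvInnerA obs target t 1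
      if md ≤ (d : Int) then pvLoopA obs target md (t + d) (acc ++ [(t : Int)])
      else pvLoopA obs target md (t + 1) acc
    else pvLoopA obs target md (t + 1) acc
  else acc
termination_by obs.length - t
decreasing_by
  · have := pvInnerA_ge obs target t 1; omega
  · omega
  · omega

def get_transition_times (obs_states : List Int) (target_state : Int) (min_duration : Int) : List Int :=
  pvLoopA obs_states target_state min_duration 1 []

-- ===== PORT B =====
-- itertools.groupby: peel off one maximal run at a time, yielding (value, run length)
def pvRuns (l : List Int) : List (Int × Nat) :=
  match l with
  | [] => []
  | x :: xs => (x, 1 + (xs.takeWhile (fun y => y == x)).length) :: pvRuns (xs.dropWhile (fun y => y == x))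
termination_by l.length
decreasing_by
  simp only [List.length_cons]
  exact Nat.lt_succ_of_le (List.length_dropWhile_le _ _)

-- the for loop over runs, with running absolute index i
def pvLoopB (target : Int) (md : Int) : List (Int × Nat) → Nat → List Int → List Int
  | [], _, res => res
  | (v, len) :: rest, i, res =>
      pvLoopB target md rest (i + len)
        (if v = target ∧ 1 ≤ i ∧ md ≤ (len : Int) then res ++ [(i : Int)] else res)

def get_transition_times_alt (obs_states : List Int) (target_state : Int) (min_duration : Int) : List Int :=
  pvLoopB target_state min_duration (pvRuns obs_states) 0 []

-- ===== PRECONDITION & SPEC =====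
def Spec_get_transition_times (obs_states : List Int) (target_state : Int) (min_duration : Int) (out : List Int) : Prop := out = get_transition_times_alt obs_states target_state min_duration
instance (obs_states : List Int) (target_state : Int) (min_duration : Int) (out : List Int) : Decidable (Spec_get_transition_times obs_states target_state min_duration out) := by unfold Spec_get_transition_times; infer_instance

-- ===== CLAIM (what is proved, stated in full; the proofs are below) =====
def Claim_equal_get_transition_times : Prop := ∀ (obs_states : List Int) (target_state : Int) (min_duration : Int), Dom_get_transition_times obs_states target_state min_duration → Spec_get_transition_times obs_states target_state min_duration (get_transition_times obs_states target_state min_duration)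

-- ===== LEMMAS AND PROOFS =====

-- suffix view of A's scan: prev = value just before the suffix, t = absolute index of its head
def pvScan (target : Int) (md : Int) : Int → List Int → Nat → List Int
  | _, [], _ => []
  | prev, x :: xs, t =>
    if x = target ∧ prev ≠ target then
      let d := 1 + (xs.takeWhile (fun y => y == target)).length
      if md ≤ (d : Int) then
        (t : Int) :: pvScan target md target (xs.dropWhile (fun y => y == target)) (t + d)
      else pvScan target md x xs (t + 1)
    else pvScan target md x xs (t + 1)
termination_by _ l _ => l.length
decreasing_by
  · simp only [List.length_cons]
    exact Nat.lt_succ_of_le (List.length_dropWhile_le _ _)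
  · simp
  · simp

theorem pvScan_nil (target md : Int) (prev : Int) (t : Nat) :
    pvScan target md prev [] t = [] := by simp [pvScan]

theorem pvLoopB_append (target md : Int) (rs : List (Int × Nat)) (i : Nat) (res : List Int) :
    pvLoopB target md rs i res = res ++ pvLoopB target md rs i [] := by
  induction rs generalizing i res with
  | nil => simp [pvLoopB]
  | cons p rest ih =>
      obtain ⟨v, len⟩ := p
      simp only [pvLoopB]
      split
      · rw [ih, ih (res := [] ++ _)]; simp
      · exact ih _ _

theorem pvInnerA_eq (obs : List Int) (target : Int) (t d : Nat) :
    pvInnerA obs target t d = d + ((obs.drop (t + d)).takeWhile (fun y => y == target)).length := by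
  unfold pvInnerA
  split
  · rename_i h
    obtain ⟨hlt, heq⟩ := h
    have hdrop : obs.drop (t + d) = target :: obs.drop (t + d + 1) := by
      rw [List.drop_eq_getElem_cons hlt]
      congr 1
      have : obs[t + d] = obs.getD (t + d) 0 := by simp [List.getD, List.getElem?_eq_getElem hlt]
      rw [this, heq]
    rw [pvInnerA_eq obs target t (d + 1), hdrop]
    simp only [List.takeWhile_cons, beq_self_eq_true, if_true, List.length_cons]
    have : t + (d + 1) = t + d + 1 := by omega
    rw [this]; omega
  · rename_i h
    have : ((obs.drop (t + d)).takeWhile (fun y => y == target)).length = 0 := by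
      by_cases hlt : t + d < obs.length
      · have heq : ¬ obs.getD (t + d) 0 = target := by tauto
        have hval : obs.getD (t + d) 0 = obs[t + d] := by
          simp [List.getD, List.getElem?_eq_getElem hlt]
        rw [hval] at heq
        rw [List.drop_eq_getElem_cons hlt]
        simp only [List.takeWhile_cons]
        simp [heq]
      · rw [List.drop_eq_nil_of_le (by omega)]; simp
    omega
termination_by obs.length - (t + d)
decreasing_by omega

-- walking through a block of target values with prev = target records nothing
theorem pvScan_targets (target md : Int) (tw dw : List Int) (t : Nat)
    (h : ∀ y ∈ tw, y = target) :
    pvScan target md target (tw ++ dw) t = pvScan target md target dw (t + tw.length) := by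
  induction tw generalizing t with
  | nil => simp
  | cons y ys ih =>
      have hy : y = target := h y (by simp)
      simp only [List.cons_append, pvScan, hy]
      simp only [ne_eq, not_true_eq_false, and_false, if_false]
      rw [ih _ (fun z hz => h z (by simp [hz]))]
      congr 1
      simp; omega

-- dropWhile = drop past the takeWhile prefix
theorem pvDropWhile_eq_drop (p : Int → Bool) (l : List Int) :
    l.dropWhile p = l.drop (l.takeWhile p).length := by
  induction l with
  | nil => simp
  | cons x xs ih =>
      by_cases hp : p x
      · simp [List.dropWhile_cons, List.takeWhile_cons, hp, ih]
      · simp [List.dropWhile_cons, List.takeWhile_cons, hp]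

-- bridge from A's index loop to the suffix scan
theorem pvLoopA_eq_scan (obs : List Int) (target md : Int) (t : Nat) (acc : List Int)
    (ht : 1 ≤ t) :
    pvLoopA obs target md t acc = acc ++ pvScan target md (obs.getD (t - 1) 0) (obs.drop t) t := by
  unfold pvLoopA
  split
  · rename_i hlt
    have hdrop : obs.drop t = obs.getD t 0 :: obs.drop (t + 1) := by
      rw [List.drop_eq_getElem_cons hlt]
      congr 1
      simp [List.getD, List.getElem?_eq_getElem hlt]
    rw [hdrop]
    simp only [pvScan]
    split
    · rename_i hcond
      have hinner : pvInnerA obs target t 1 =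
          1 + ((obs.drop (t + 1)).takeWhile (fun y => y == target)).length := by
        rw [pvInnerA_eq]
      set k := ((obs.drop (t + 1)).takeWhile (fun y => y == target)).length with hk
      split
      · rename_i hmd
        have hmd' : md ≤ ((1 + k : Nat) : Int) := by
          rw [hinner] at hmd; exact_mod_cast hmd
        rw [if_pos hmd']
        -- after the skip: new position t + 1 + k, remaining list is the dropWhile
        have hdw : obs.drop (t + (1 + k)) = (obs.drop (t + 1)).dropWhile (fun y => y == target) := by
          have h1 : t + (1 + k) = (t + 1) + k := by omega
          rw [h1, ← List.drop_drop, pvDropWhile_eq_drop, ← hk]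
        have hprev : obs.getD (t + pvInnerA obs target t 1 - 1) 0 = target := by
          rw [hinner]
          rcases Nat.eq_zero_or_pos k with hk0 | hkpos
          · have : t + (1 + k) - 1 = t := by omega
            rw [this]; exact hcond.1
          · -- element k-1 of drop (t+1) is inside the takeWhile prefix, hence = target
            have hlen : k - 1 < ((obs.drop (t + 1)).takeWhile (fun y => y == target)).length := by omega
            have hpre := List.takeWhile_prefix (l := obs.drop (t + 1)) (p := fun y => y == target)
            have hlen2 : k - 1 < (obs.drop (t + 1)).length :=
              lt_of_lt_of_le hlen (List.IsPrefix.length_le hpre)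
            have hget : ((obs.drop (t + 1)).takeWhile (fun y => y == target))[k-1]'hlen
                = (obs.drop (t + 1))[k-1]'hlen2 := List.IsPrefix.getElem hpre hlen
            have hmem : ((obs.drop (t + 1)).takeWhile (fun y => y == target))[k-1]'hlen
                ∈ (obs.drop (t + 1)).takeWhile (fun y => y == target) := List.getElem_mem _
            have htg : (((obs.drop (t + 1)).takeWhile (fun y => y == target))[k-1]'hlen == target) = true :=
              List.mem_takeWhile_imp (p := fun y => y == target) hmem
            have hdl : (obs.drop (t + 1)).length = obs.length - (t + 1) := List.length_drop
            have hrange : t + 1 + (k - 1) < obs.length := by omega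
            have hidx : (obs.drop (t + 1))[k-1]'hlen2 = obs[t + 1 + (k - 1)]'hrange :=
              List.getElem_drop
            have : obs.getD (t + (1 + k) - 1) 0 = obs[t + 1 + (k - 1)]'hrange := by
              have he : t + (1 + k) - 1 = t + 1 + (k - 1) := by omega
              rw [he]; simp [List.getD, List.getElem?_eq_getElem hrange]
            rw [this, ← hidx, ← hget]
            exact eq_of_beq htg
        rw [pvLoopA_eq_scan obs target md (t + pvInnerA obs target t 1) (acc ++ [(t : Int)])
            (by have := pvInnerA_ge obs target t 1; omega), hprev]
        rw [hinner, hdw]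
        simp
      · rename_i hmd
        have hmd' : ¬ md ≤ ((1 + k : Nat) : Int) := by
          rw [hinner] at hmd; exact_mod_cast hmd
        rw [if_neg hmd']
        rw [pvLoopA_eq_scan obs target md (t + 1) acc (by omega)]
        simp
    · rw [pvLoopA_eq_scan obs target md (t + 1) acc (by omega)]
      simp
  · rename_i hge
    rw [List.drop_eq_nil_of_le (by omega), pvScan_nil]
    simp
termination_by obs.length - t
decreasing_by
  · have := pvInnerA_ge obs target t 1; omega
  · omega
  · omega

-- main correspondence: the suffix scan equals the run-filter pass, provided the scan
-- does not start in the middle of a target run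
theorem pvScan_eq_loopB (target md : Int) (l : List Int) (prev : Int) (t : Nat)
    (ht : 1 ≤ t) (h : prev = target → l.head? ≠ some target) :
    pvScan target md prev l t = pvLoopB target md (pvRuns l) t [] := by
  match l with
  | [] => simp [pvScan_nil, pvRuns, pvLoopB]
  | x :: xs =>
    have hsplit : xs = xs.takeWhile (fun y => y == x) ++ xs.dropWhile (fun y => y == x) :=
      (List.takeWhile_append_dropWhile ..).symm
    have htw : ∀ y ∈ xs.takeWhile (fun y => y == x), y = x := fun y hy =>
      eq_of_beq (List.mem_takeWhile_imp (p := fun z => z == x) hy)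
    have hhead : (xs.dropWhile (fun y => y == x)).head? ≠ some x := by
      intro hc
      have := List.head?_dropWhile_not (p := fun y => y == x) (l := xs)
      rw [hc] at this; simp at this
    simp only [pvRuns, pvLoopB]
    by_cases hx : x = target
    · subst hx
      have hprev : prev ≠ x := by
        intro hp; exact (h hp) (by simp)
      set k := (xs.takeWhile (fun y => y == x)).length with hk
      simp only [pvScan]
      rw [if_pos ⟨trivial, hprev⟩]
      by_cases hmd : md ≤ ((1 + k : Nat) : Int)
      · rw [if_pos hmd, if_pos ⟨trivial, ht, hmd⟩]
        rw [pvScan_eq_loopB x md _ x (t + (1 + k)) (by omega) (fun _ => hhead)]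
        conv_rhs => rw [pvLoopB_append]
        simp
      · rw [if_neg hmd, if_neg (by rintro ⟨-, -, hc⟩; exact hmd hc)]
        conv_lhs => rw [hsplit]
        rw [pvScan_targets x md _ _ _ htw]
        rw [pvScan_eq_loopB x md _ x (t + 1 + k) (by omega) (fun _ => hhead)]
        have harith : t + 1 + k = t + (1 + k) := by omega
        rw [harith]
    · -- current run value is not the target: scan steps to (x, xs) and the rest of
      -- the x-run merges into the first run of xs on the B side
      simp only [pvScan, hx, false_and, if_false]
      have hrec : pvScan target md x xs (t + 1) = pvLoopB target md (pvRuns xs) (t + 1) [] :=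
        pvScan_eq_loopB target md xs x (t + 1) (by omega) (fun hp => absurd hp hx)
      rw [hrec]
      match xs with
      | [] => simp [pvRuns, pvLoopB]
      | y :: ys =>
        by_cases hyx : y = x
        · subst hyx
          simp only [pvRuns, List.takeWhile_cons, beq_self_eq_true, if_true,
            List.dropWhile_cons, List.length_cons, pvLoopB]
          rw [if_neg (by rintro ⟨hc, -⟩; exact hx hc)]
          have harith : ∀ m : Nat, t + 1 + (1 + m) = t + (1 + (m + 1)) := by omega
          rw [harith]
        · have hby : (y == x) = false := by simp [hyx]
          simp only [List.takeWhile_cons, List.dropWhile_cons, hby, Bool.false_eq_true,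
            if_false, cond_false, List.length_nil]
termination_by l.length
decreasing_by
  all_goals simp_wf
  all_goals try simp only [List.length_cons]
  all_goals first
    | exact List.length_dropWhile_le _ _
    | simp
    | omega

-- ===== VERDICT (by name: the statement is the Claim_ definition above) =====
theorem get_transition_times_spec : Claim_equal_get_transition_times := by
  intro obs target md _
  unfold Spec_get_transition_times get_transition_times get_transition_times_alt
  rw [pvLoopA_eq_scan obs target md 1 [] (le_refl _)]
  match obs with
  | [] => simp [pvScan_nil, pvRuns, pvLoopB]
  | x :: xs =>
    have htw : ∀ y ∈ xs.takeWhile (fun y => y == x), y = x := fun y hy =>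
      eq_of_beq (List.mem_takeWhile_imp (p := fun z => z == x) hy)
    have hhead : (xs.dropWhile (fun y => y == x)).head? ≠ some x := by
      intro hc
      have := List.head?_dropWhile_not (p := fun y => y == x) (l := xs)
      rw [hc] at this; simp at this
    have hprev : (x :: xs).getD 0 0 = x := rfl
    have hdrop1 : (x :: xs).drop 1 = xs := rfl
    rw [hprev, hdrop1]
    simp only [pvRuns, pvLoopB]
    rw [if_neg (by rintro ⟨-, hc, -⟩; omega), List.nil_append, Nat.zero_add]
    by_cases hx : x = target
    · subst hx
      conv_lhs => rw [show xs = xs.takeWhile (fun y => y == x) ++ xs.dropWhile (fun y => y == x)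
        from (List.takeWhile_append_dropWhile ..).symm]
      rw [pvScan_targets x md _ _ _ htw]
      rw [pvScan_eq_loopB x md _ x (1 + (xs.takeWhile (fun y => y == x)).length)
        (by omega) (fun _ => hhead)]
    · rw [pvScan_eq_loopB target md xs x 1 (le_refl _) (fun hp => absurd hp hx)]
      -- merge the remainder of the first x-run on the B side (never recorded: x ≠ target)
      match xs with
      | [] => simp [pvRuns, pvLoopB]
      | y :: ys =>
        by_cases hyx : y = x
        · subst hyx
          simp only [pvRuns, List.takeWhile_cons, beq_self_eq_true, if_true,
            List.dropWhile_cons, List.length_cons, pvLoopB]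
          rw [if_neg (by rintro ⟨hc, -⟩; exact hx hc)]
          have harith : ∀ m : Nat, 1 + (1 + m) = 1 + (m + 1) := by omega
          rw [harith]
        · have hby : (y == x) = false := by simp [hyx]
          simp only [List.takeWhile_cons, List.dropWhile_cons, hby, Bool.false_eq_true,
            if_false, cond_false, List.length_nil]
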